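-- pv_equiv track=rewrite | github.com/Brndn004/squatting_in_the_texting_rack | nutrition/scripts/ingredient_management_lib.py | rank_matches
-- ===== SOURCE A (Python) =====
-- import typing
--
-- def rank_matches(query: str, lookup_data: typing.Dict[str, int]) -> typing.List[typing.Tuple[int, str, int]]:
--     """Rank ingredient matches by relevance.
--
--     Args:
--         query: Search query (will be lowercased internally).
--         lookup_data: Dictionary mapping descriptions to FDC IDs.
--
--     Returns:
--         List of tuples (score, description, fdc_id) sorted by score (highest first).
--         Score: 3 = exact match, 2 = starts with, 1 = contains, 0 = no match.
--     """
--     query_lower = query.lower()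
--     matches = []
--
--     for description, fdc_id in lookup_data.items():
--         desc_lower = description.lower()
--         score = 0
--
--         if desc_lower == query_lower:
--             score = 3  # Exact match
--         elif desc_lower.startswith(query_lower):
--             score = 2  # Starts with query
--         elif query_lower in desc_lower:
--             score = 1  # Contains query
--
--         if score > 0:
--             matches.append((score, description, fdc_id))
--
--     # Sort by score (descending), then by description (ascending)
--     matches.sort(key=lambda x: (-x[0], x[1]))
--     return matches
-- ===== SOURCE B (Python) =====
-- def rank_matches(query, lookup_data):
--     q = query.lower()
--     exact, prefix, contains = [], [], []
--     for description, fdc_id in lookup_data.items():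
--         d = description.lower()
--         if d == q:
--             exact.append((3, description, fdc_id))
--         elif d.startswith(q):
--             prefix.append((2, description, fdc_id))
--         elif q in d:
--             contains.append((1, description, fdc_id))
--     by_desc = lambda x: x[1]
--     return sorted(exact, key=by_desc) + sorted(prefix, key=by_desc) + sorted(contains, key=by_desc)
-- ===== Notes on version B (the rewrite author's own statement) =====
-- stated objective: alternative
-- what changed: B replaces A's compute-a-score-then-sort-once-by-(-score,description) pipeline with a three-bucket partition (exact / prefix / substring) sorted independently by description and concatenated; Pre_ only excludes association lists with duplicate descriptions, which do not represent a Python dict argument.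
import Mathlib
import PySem

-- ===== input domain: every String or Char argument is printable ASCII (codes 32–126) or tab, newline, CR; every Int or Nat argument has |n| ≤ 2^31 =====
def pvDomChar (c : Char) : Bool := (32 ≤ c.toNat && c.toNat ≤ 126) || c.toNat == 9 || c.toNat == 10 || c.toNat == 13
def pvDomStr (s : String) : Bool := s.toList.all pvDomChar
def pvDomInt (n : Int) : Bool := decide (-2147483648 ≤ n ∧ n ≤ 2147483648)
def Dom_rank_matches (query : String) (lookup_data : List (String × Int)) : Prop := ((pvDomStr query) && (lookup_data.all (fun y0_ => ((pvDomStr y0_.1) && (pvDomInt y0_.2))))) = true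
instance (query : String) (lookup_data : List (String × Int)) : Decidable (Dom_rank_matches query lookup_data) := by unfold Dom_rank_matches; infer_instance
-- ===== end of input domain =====

-- B partitions the entries into exact / prefix / substring buckets, sorts each by description
-- and concatenates, instead of A's numeric score and single composite sort (objective: alternative).

-- ===== PORT A =====
-- loop body of A's `for description, fdc_id in lookup_data.items()` (ql = query.lower())
def pvStepA (ql : String) (ms : List (Int × String × Int)) (kv : String × Int) : List (Int × String × Int) :=
  let desc_lower := PySem.Str.lower kv.1
  let score : Int :=
    if desc_lower = ql then 3
    else if PySem.Str.startswith desc_lower ql then 2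
    else if PySem.Str.isIn ql desc_lower then 1
    else 0
  if score > 0 then ms ++ [(score, kv.1, kv.2)] else ms

def rank_matches (query : String) (lookup_data : List (String × Int)) : List (Int × String × Int) :=
  let query_lower := PySem.Str.lower query
  let ms := lookup_data.foldl (pvStepA query_lower) []
  PySem.List.sorted2 ms (fun x => -x.1) (fun x => x.2.1)

-- ===== PORT B =====
-- loop body of B's single pass: acc = (exact, prefix, contains)
def pvStepB (ql : String)
    (acc : List (Int × String × Int) × List (Int × String × Int) × List (Int × String × Int))
    (kv : String × Int) :
    List (Int × String × Int) × List (Int × String × Int) × List (Int × String × Int) :=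
  let d := PySem.Str.lower kv.1
  if d = ql then (acc.1 ++ [((3 : Int), kv.1, kv.2)], acc.2.1, acc.2.2)
  else if PySem.Str.startswith d ql then (acc.1, acc.2.1 ++ [((2 : Int), kv.1, kv.2)], acc.2.2)
  else if PySem.Str.isIn ql d then (acc.1, acc.2.1, acc.2.2 ++ [((1 : Int), kv.1, kv.2)])
  else acc

def rank_matches_alt (query : String) (lookup_data : List (String × Int)) : List (Int × String × Int) :=
  let q := PySem.Str.lower query
  let acc := lookup_data.foldl (pvStepB q) ([], [], [])
  PySem.List.sorted acc.1 (fun x => x.2.1) ++ PySem.List.sorted acc.2.1 (fun x => x.2.1)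
    ++ PySem.List.sorted acc.2.2 (fun x => x.2.1)

-- ===== PRECONDITION & SPEC =====
-- Pre_ only excludes association lists with duplicate descriptions, which do not represent a
-- Python dict argument (dict keys are unique).
def Pre_rank_matches (query : String) (lookup_data : List (String × Int)) : Prop :=
  (lookup_data.map Prod.fst).Nodup
instance (query : String) (lookup_data : List (String × Int)) : Decidable (Pre_rank_matches query lookup_data) := by unfold Pre_rank_matches; infer_instance

def pvWitness_rank_matches : String × (List (String × Int)) :=
  ("ap", [("Apple", 1), ("apple pie", 2), ("crab apple", 3), ("banana", 4)])

def Spec_rank_matches (query : String) (lookup_data : List (String × Int)) (out : List (Int × String × Int)) : Prop := out = rank_matches_alt query lookup_data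
instance (query : String) (lookup_data : List (String × Int)) (out : List (Int × String × Int)) : Decidable (Spec_rank_matches query lookup_data out) := by unfold Spec_rank_matches; infer_instance

-- ===== CLAIM (what is proved, stated in full; the proofs are below) =====
def Claim_equal_rank_matches : Prop := ∀ (query : String) (lookup_data : List (String × Int)), Dom_rank_matches query lookup_data → Pre_rank_matches query lookup_data → Spec_rank_matches query lookup_data (rank_matches query lookup_data)

-- ===== LEMMAS AND PROOFS =====

-- the comparator of A's sort `matches.sort(key=lambda x: (-x[0], x[1]))` as sorted2 uses it
def pvLt (a b : Int × String × Int) : Bool :=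
  decide (-a.1 < -b.1) || (!decide (-b.1 < -a.1) && decide (a.2.1 < b.2.1))

lemma pvLt_iff (a b : Int × String × Int) :
    pvLt a b = true ↔ (b.1 < a.1 ∨ (a.1 = b.1 ∧ a.2.1 < b.2.1)) := by
  simp only [pvLt, Bool.or_eq_true, decide_eq_true_eq, Bool.and_eq_true,
    Bool.not_eq_true', decide_eq_false_iff_not]
  constructor
  · rintro (h | ⟨h1, h2⟩)
    · left; omega
    · by_cases hx : b.1 < a.1
      · left; exact hx
      · right; exact ⟨by omega, h2⟩
  · rintro (h | ⟨h1, h2⟩)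
    · left; omega
    · right; exact ⟨by omega, h2⟩

lemma pvLt_asymm {a b : Int × String × Int} (h : pvLt a b = true) : pvLt b a = false := by
  rw [pvLt_iff] at h
  rw [← Bool.not_eq_true, pvLt_iff]
  rintro (h' | ⟨h1', h2'⟩) <;> rcases h with h | ⟨h1, h2⟩
  · omega
  · omega
  · omega
  · exact absurd h2' (lt_asymm h2)

lemma pvLt_trans {a b c : Int × String × Int} (h1 : pvLt a b = true) (h2 : pvLt b c = true) :
    pvLt a c = true := by
  rw [pvLt_iff] at h1 h2 ⊢
  rcases h1 with h1 | ⟨h1, h1'⟩ <;> rcases h2 with h2 | ⟨h2, h2'⟩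
  · left; omega
  · left; omega
  · left; omega
  · right; exact ⟨by omega, lt_trans h1' h2'⟩

-- insertion with pvLt preserves the "weakly sorted" invariant
lemma insertBy_pairwise_pvLt (x : Int × String × Int) (ys : List (Int × String × Int))
    (h : ys.Pairwise (fun a b => pvLt b a = false)) :
    (PySem.List.insertBy pvLt x ys).Pairwise (fun a b => pvLt b a = false) := by
  induction ys with
  | nil => simp [PySem.List.insertBy]
  | cons y ys ih =>
    rw [List.pairwise_cons] at h
    by_cases hxy : pvLt x y = true
    · simp only [PySem.List.insertBy, hxy, if_true]
      refine List.pairwise_cons.mpr ⟨?_, List.pairwise_cons.mpr ⟨h.1, h.2⟩⟩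
      intro z hz
      rcases List.mem_cons.mp hz with rfl | hz
      · exact pvLt_asymm hxy
      · by_contra hc
        rw [Bool.not_eq_false] at hc
        exact absurd (h.1 z hz) (by simp [pvLt_trans hc hxy])
    · simp only [PySem.List.insertBy, hxy]
      refine List.pairwise_cons.mpr ⟨?_, ih h.2⟩
      intro z hz
      rcases (PySem.List.insertBy_mem_iff pvLt x z ys).mp hz with rfl | hz
      · exact Bool.not_eq_true _ ▸ hxy
      · exact h.1 z hz

lemma foldl_insertBy_pairwise (ms : List (Int × String × Int)) :
    ∀ acc, acc.Pairwise (fun a b => pvLt b a = false) →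
      (ms.foldl (fun acc x => PySem.List.insertBy pvLt x acc) acc).Pairwise
        (fun a b => pvLt b a = false) := by
  induction ms with
  | nil => intro acc h; simpa using h
  | cons m ms ih =>
    intro acc h
    exact ih _ (insertBy_pairwise_pvLt m acc h)

-- a strictly pvLt-increasing permutation of a weakly sorted list equals it
lemma eq_of_pairwise (zs : List (Int × String × Int)) :
    ∀ ys, zs.Perm ys → ys.Pairwise (fun a b => pvLt b a = false) →
      zs.Pairwise (fun a b => pvLt a b = true) → ys = zs := by
  induction zs with
  | nil => intro ys hp _ _; exact hp.nil_eq.symm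
  | cons b t2 ih =>
    intro ys hp h1 h2
    rcases ys with _ | ⟨a, t1⟩
    · exact absurd hp.symm (by simp)
    by_cases hab : a = b
    · subst hab
      rw [List.pairwise_cons] at h1 h2
      have := ih t1 hp.cons_inv h1.2 h2.2
      rw [this]
    · exfalso
      have hbmem : b ∈ a :: t1 := hp.mem_iff.mp (List.mem_cons_self ..)
      have hamem : a ∈ b :: t2 := hp.symm.mem_iff.mp (List.mem_cons_self ..)
      rcases List.mem_cons.mp hbmem with rfl | hb
      · exact hab rfl
      rcases List.mem_cons.mp hamem with rfl | ha
      · exact hab rfl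
      have h1' := (List.pairwise_cons.mp h1).1 b hb
      have h2' := (List.pairwise_cons.mp h2).1 a ha
      rw [h2'] at h1'
      exact absurd h1' (by simp)

-- permutation juggling for a snoc into one of three buckets
lemma pvPermSnoc1 {α : Type} (x : α) (e p c : List α) :
    ((e ++ p ++ c) ++ [x]).Perm ((e ++ [x]) ++ p ++ c) := by
  simp only [List.append_assoc]
  exact List.Perm.append_left e (by simpa using List.perm_append_comm (l₁ := p ++ c) (l₂ := [x]))

lemma pvPermSnoc2 {α : Type} (x : α) (e p c : List α) :
    ((e ++ p ++ c) ++ [x]).Perm (e ++ (p ++ [x]) ++ c) := by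
  simp only [List.append_assoc]
  refine List.Perm.append_left e ?_
  have h1 : (c ++ [x]).Perm ([x] ++ c) := List.perm_append_comm
  refine (h1.append_left p).trans ?_
  simpa using List.perm_middle.symm

-- the two loops build permutation-equal contents
lemma fold_sim (ql : String) (l : List (String × Int)) :
    ∀ ms acc, ms.Perm (acc.1 ++ acc.2.1 ++ acc.2.2) →
      (l.foldl (pvStepA ql) ms).Perm
        ((l.foldl (pvStepB ql) acc).1 ++ (l.foldl (pvStepB ql) acc).2.1
          ++ (l.foldl (pvStepB ql) acc).2.2) := by
  induction l with
  | nil => intro ms acc h; simpa using h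
  | cons kv l ih =>
    intro ms acc h
    simp only [List.foldl_cons]
    apply ih
    by_cases h1 : PySem.Str.lower kv.1 = ql
    · simp only [pvStepA, pvStepB, h1, if_true, show ((3:Int) > 0) by norm_num]
      exact (h.append_right [((3:Int), kv.1, kv.2)]).trans (pvPermSnoc1 ..)
    · by_cases h2 : PySem.Str.startswith (PySem.Str.lower kv.1) ql
      · simp only [pvStepA, pvStepB, h1, h2, if_true, if_false,
          show ((2:Int) > 0) by norm_num]
        exact (h.append_right [((2:Int), kv.1, kv.2)]).trans (pvPermSnoc2 ..)
      · by_cases h3 : PySem.Str.isIn ql (PySem.Str.lower kv.1)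
        · simp only [pvStepA, pvStepB, h1, h2, h3, if_true, if_false,
            ]
          refine (h.append_right [((1:Int), kv.1, kv.2)]).trans ?_
          simp [List.append_assoc]
        · simpa only [pvStepA, pvStepB, h1, h2, h3, ite_false, ite_true] using h

-- bucket score invariants
lemma fold_inv (ql : String) (l : List (String × Int)) :
    ∀ acc, (∀ x ∈ acc.1, x.1 = 3) → (∀ x ∈ acc.2.1, x.1 = 2) → (∀ x ∈ acc.2.2, x.1 = 1) →
      (∀ x ∈ (l.foldl (pvStepB ql) acc).1, x.1 = 3) ∧
      (∀ x ∈ (l.foldl (pvStepB ql) acc).2.1, x.1 = 2) ∧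
      (∀ x ∈ (l.foldl (pvStepB ql) acc).2.2, x.1 = 1) := by
  induction l with
  | nil => intro acc h1 h2 h3; exact ⟨h1, h2, h3⟩
  | cons kv l ih =>
    intro acc h1 h2 h3
    simp only [List.foldl_cons]
    by_cases ha : PySem.Str.lower kv.1 = ql
    · simp only [pvStepB, ha, if_true]
      refine ih _ ?_ h2 h3
      intro x hx
      rcases List.mem_append.mp hx with hx | hx
      · exact h1 x hx
      · simp at hx; simp [hx]
    · by_cases hb : PySem.Str.startswith (PySem.Str.lower kv.1) ql
      · simp only [pvStepB, ha, hb, if_true, if_false]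
        refine ih _ h1 ?_ h3
        intro x hx
        rcases List.mem_append.mp hx with hx | hx
        · exact h2 x hx
        · simp at hx; simp [hx]
      · by_cases hc : PySem.Str.isIn ql (PySem.Str.lower kv.1)
        · simp only [pvStepB, ha, hb, hc, if_true, if_false]
          refine ih _ h1 h2 ?_
          intro x hx
          rcases List.mem_append.mp hx with hx | hx
          · exact h3 x hx
          · simp at hx; simp [hx]
        · simp only [pvStepB, ha, hb, hc, if_false]
          exact ih _ h1 h2 h3

-- A's match list takes its descriptions (in order) from the input keys
lemma fold_descs_sublist (ql : String) (l : List (String × Int)) :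
    ∀ ms, ((l.foldl (pvStepA ql) ms).map (fun x => x.2.1)).Sublist
      (ms.map (fun x => x.2.1) ++ l.map Prod.fst) := by
  induction l with
  | nil => intro ms; simpa using List.Sublist.refl _
  | cons kv l ih =>
    intro ms
    simp only [List.foldl_cons, List.map_cons]
    refine (ih (pvStepA ql ms kv)).trans ?_
    have hstep : (pvStepA ql ms kv).map (fun x => x.2.1) = ms.map (fun x => x.2.1) ++ [kv.1]
        ∨ (pvStepA ql ms kv).map (fun x => x.2.1) = ms.map (fun x => x.2.1) := by
      simp only [pvStepA]
      split_ifs <;> simp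
    rcases hstep with hstep | hstep
    · rw [show ms.map (fun x => x.2.1) ++ kv.1 :: l.map Prod.fst
          = (ms.map (fun x => x.2.1) ++ [kv.1]) ++ l.map Prod.fst by simp, ← hstep]

    · rw [hstep]
      exact List.Sublist.append (List.Sublist.refl _) (List.sublist_cons_self _ _)

-- a sorted bucket with distinct descriptions and constant score is strictly pvLt-increasing
lemma sorted_bucket_pairwise (bkt : List (Int × String × Int)) (s : Int)
    (hs : ∀ x ∈ bkt, x.1 = s) (hnd : (bkt.map (fun x => x.2.1)).Nodup) :
    (PySem.List.sorted bkt (fun x => x.2.1)).Pairwise (fun a b => pvLt a b = true) := by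
  have hperm := PySem.List.sorted_perm (xs := bkt) (key := fun x => x.2.1) (rev := false)
  have hle := PySem.List.sorted_pairwise (xs := bkt) (key := fun x => x.2.1)
  have hnd' : ((PySem.List.sorted bkt (fun x => x.2.1)).map (fun x => x.2.1)).Nodup :=
    (hperm.map (fun x => x.2.1)).nodup_iff.mpr hnd
  have hne : (PySem.List.sorted bkt (fun x => x.2.1)).Pairwise
      (fun a b => (fun x => x.2.1) a ≠ (fun x => x.2.1) b) := List.pairwise_map.mp hnd'
  refine (hle.and hne).imp_of_mem ?_
  intro a b ha hb h
  rw [pvLt_iff]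
  right
  have ha' := hs a (hperm.mem_iff.mp ha)
  have hb' := hs b (hperm.mem_iff.mp hb)
  exact ⟨by omega, lt_of_le_of_ne h.1 h.2⟩

-- B's output is strictly pvLt-increasing
lemma alt_pairwise (e p c : List (Int × String × Int))
    (he : ∀ x ∈ e, x.1 = 3) (hp : ∀ x ∈ p, x.1 = 2) (hc : ∀ x ∈ c, x.1 = 1)
    (hnd : ((e ++ p ++ c).map (fun x => x.2.1)).Nodup) :
    (PySem.List.sorted e (fun x => x.2.1) ++ PySem.List.sorted p (fun x => x.2.1)
      ++ PySem.List.sorted c (fun x => x.2.1)).Pairwise (fun a b => pvLt a b = true) := by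
  simp only [List.map_append, List.nodup_append] at hnd
  have pe := sorted_bucket_pairwise e 3 he hnd.1.1
  have pp := sorted_bucket_pairwise p 2 hp hnd.1.2.1
  have pc := sorted_bucket_pairwise c 1 hc hnd.2.1
  have hme : ∀ x ∈ PySem.List.sorted e (fun x => x.2.1), x.1 = 3 :=
    fun x hx => he x ((PySem.List.sorted_perm ..).mem_iff.mp hx)
  have hmp : ∀ x ∈ PySem.List.sorted p (fun x => x.2.1), x.1 = 2 :=
    fun x hx => hp x ((PySem.List.sorted_perm ..).mem_iff.mp hx)
  have hmc : ∀ x ∈ PySem.List.sorted c (fun x => x.2.1), x.1 = 1 :=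
    fun x hx => hc x ((PySem.List.sorted_perm ..).mem_iff.mp hx)
  rw [List.append_assoc, List.pairwise_append]
  refine ⟨pe, List.pairwise_append.mpr ⟨pp, pc, ?_⟩, ?_⟩
  · intro a ha b hb
    rw [pvLt_iff]; left
    rw [hmp a ha, hmc b hb]; norm_num
  · intro a ha b hb
    rw [pvLt_iff]; left
    rcases List.mem_append.mp hb with hb | hb
    · rw [hme a ha, hmp b hb]; norm_num
    · rw [hme a ha, hmc b hb]; norm_num

-- ===== VERDICT (by name: the statement is the Claim_ definition above) =====
theorem rank_matches_spec : Claim_equal_rank_matches := by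
  intro query lookup_data _ hpre
  unfold Spec_rank_matches rank_matches rank_matches_alt
  set ql := PySem.Str.lower query with hql
  set ms := lookup_data.foldl (pvStepA ql) [] with hms
  set acc := lookup_data.foldl (pvStepB ql) ([], [], []) with hacc
  have hperm : ms.Perm (acc.1 ++ acc.2.1 ++ acc.2.2) :=
    fold_sim ql lookup_data [] ([], [], []) (by simp)
  obtain ⟨he, hp, hc⟩ := fold_inv ql lookup_data ([], [], []) (by simp) (by simp) (by simp)
  have hndms : (ms.map (fun x => x.2.1)).Nodup := by
    refine List.Sublist.nodup ?_ hpre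
    simpa using fold_descs_sublist ql lookup_data []
  have hnd : ((acc.1 ++ acc.2.1 ++ acc.2.2).map (fun x => x.2.1)).Nodup :=
    ((hperm.map (fun x => x.2.1)).nodup_iff).mp hndms
  set zs := PySem.List.sorted acc.1 (fun x => x.2.1) ++ PySem.List.sorted acc.2.1 (fun x => x.2.1)
    ++ PySem.List.sorted acc.2.2 (fun x => x.2.1) with hzs
  have hzperm : zs.Perm ms := by
    refine List.Perm.trans ?_ hperm.symm
    rw [hzs]
    exact ((PySem.List.sorted_perm ..).append (PySem.List.sorted_perm ..)).append
      (PySem.List.sorted_perm ..)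
  have hzpair : zs.Pairwise (fun a b => pvLt a b = true) := alt_pairwise _ _ _ he hp hc hnd
  have hA : PySem.List.sorted2 ms (fun x => -x.1) (fun x => x.2.1)
      = ms.foldl (fun acc x => PySem.List.insertBy pvLt x acc) [] := rfl
  have hApair := foldl_insertBy_pairwise ms [] (by simp)
  have hAperm : (ms.foldl (fun acc x => PySem.List.insertBy pvLt x acc) []).Perm ms := by
    rw [← hA]; exact PySem.List.sorted2_perm ..
  rw [hA]
  exact eq_of_pairwise zs _ (hzperm.trans hAperm.symm) hApair hzpair
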